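-- pv_equiv track=rewrite | github.com/12novel30/codingTest | 프로그래머스/lv2/42584. 주식가격/주식가격.py | solution
-- ===== SOURCE A (Python) =====
-- def solution(prices):
--     answer = [0 for _ in range(len(prices))]
--     stack = []
--     for i,p in enumerate(prices):
--         if i == 0:
--             stack.append([p,i])
--         else:
--             while stack[-1][0] > p:
--                 answer[stack[-1][1]] = i - stack[-1][1]
--                 stack.pop()
--                 if len(stack) == 0: break
--             stack.append([p,i])
--     for i in range(len(answer)):
--         if answer[i] == 0:
--             answer[i] = len(answer)-1 - i
--     return answer
-- ===== SOURCE B (Python) =====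
-- def solution(prices):
--     n = len(prices)
--     answer = [0] * n
--     for i in range(n):
--         for j in range(i + 1, n):
--             answer[i] += 1
--             if prices[j] < prices[i]:
--                 break
--     return answer
-- ===== Notes on version B (the rewrite author's own statement) =====
-- stated objective: simpler
-- what changed: Replaces A's monotonic-stack single pass plus a fixup loop over zero entries by a plain nested loop that, for each index, scans forward counting seconds until the first strictly smaller price.
import Mathlib
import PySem

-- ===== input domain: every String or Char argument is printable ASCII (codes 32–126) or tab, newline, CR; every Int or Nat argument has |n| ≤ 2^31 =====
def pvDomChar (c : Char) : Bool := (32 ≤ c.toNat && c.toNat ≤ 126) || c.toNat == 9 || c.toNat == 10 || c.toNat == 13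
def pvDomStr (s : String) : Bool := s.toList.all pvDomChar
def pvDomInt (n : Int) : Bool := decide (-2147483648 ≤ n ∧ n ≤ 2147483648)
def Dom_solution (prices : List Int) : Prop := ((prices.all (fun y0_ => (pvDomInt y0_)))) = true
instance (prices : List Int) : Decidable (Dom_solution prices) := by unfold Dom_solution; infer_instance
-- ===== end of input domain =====

-- B replaces A's monotonic-stack single pass by a plain nested forward scan (simpler; not faster).

-- ===== PORT A =====
-- the inner `while stack[-1][0] > p: … pop …; if len(stack)==0: break` loop of A
def popA (p : Int) (i : Nat) : List Int → List (Int × Nat) → List Int × List (Int × Nat)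
  | ans, [] => (ans, [])            -- the `if len(stack) == 0: break` exit
  | ans, (q, idx) :: rest =>
    if q > p then popA p i (ans.set idx ((i : Int) - (idx : Int))) rest
    else (ans, (q, idx) :: rest)

-- one iteration of A's `for i,p in enumerate(prices)` loop; state = (answer, stack), stack head = top
def stepA (st : List Int × List (Int × Nat)) (pi : Int × Nat) : List Int × List (Int × Nat) :=
  if pi.2 = 0 then (st.1, (pi.1, 0) :: st.2)
  else
    let r := popA pi.1 pi.2 st.1 st.2
    (r.1, (pi.1, pi.2) :: r.2)

def solution (prices : List Int) : List Int :=
  let r := prices.zipIdx.foldl stepA (List.replicate prices.length 0, [])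
  -- A's second loop: `if answer[i] == 0: answer[i] = len(answer)-1 - i`
  r.1.zipIdx.map (fun ai => if ai.1 = 0 then (r.1.length : Int) - 1 - (ai.2 : Int) else ai.1)

-- ===== PORT B =====
-- B's inner loop: `for j in range(i+1, n): answer[i] += 1; if prices[j] < prices[i]: break`
def countFwd (p : Int) : List Int → Int
  | [] => 0
  | q :: rest => if q < p then 1 else 1 + countFwd p rest

-- B's outer loop over i, as recursion over the suffixes of prices
def solution_alt : List Int → List Int
  | [] => []
  | p :: rest => countFwd p rest :: solution_alt rest

-- ===== PRECONDITION & SPEC =====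
def Spec_solution (prices : List Int) (out : List Int) : Prop := out = solution_alt prices
instance (prices : List Int) (out : List Int) : Decidable (Spec_solution prices out) := by unfold Spec_solution; infer_instance

-- ===== CLAIM (what is proved, stated in full; the proofs are below) =====
def Claim_equal_solution : Prop := ∀ (prices : List Int), Dom_solution prices → Spec_solution prices (solution prices)

-- ===== LEMMAS AND PROOFS =====

-- price at index i (0 is never returned for in-range indices; out of range only appears vacuously)
def pv (prices : List Int) (i : Nat) : Int := prices.getD i 0

-- "index i has seen no strictly smaller price up to (exclusive) k"
def keepU (prices : List Int) (k i : Nat) : Prop := ∀ j, i < j → j < k → pv prices i ≤ pv prices j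

-- B's value at index i
def cf (prices : List Int) (i : Nat) : Int := countFwd (pv prices i) (prices.drop (i + 1))

def StkOk (prices : List Int) (k : Nat) (stk : List (Int × Nat)) : Prop :=
  List.Pairwise (fun a b => b.1 ≤ a.1 ∧ b.2 < a.2) stk ∧
  ∀ e ∈ stk, e.1 = pv prices e.2 ∧ e.2 < k ∧ keepU prices k e.2

def AnsOk (prices : List Int) (k : Nat) (ans : List Int) (stk : List (Int × Nat)) : Prop :=
  ans.length = prices.length ∧
  (∀ i, i ∈ stk.map Prod.snd → ans.getD i 0 = 0) ∧
  (∀ i, i < k → i ∉ stk.map Prod.snd → ans.getD i 0 = cf prices i ∧ 1 ≤ ans.getD i 0) ∧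
  (∀ i, k ≤ i → ans.getD i 0 = 0)

lemma getD_drop (l : List Int) (m j : Nat) : (l.drop m).getD j 0 = l.getD (m + j) 0 := by
  simp [List.getD_eq_getElem?_getD, List.getElem?_drop]

lemma getD_set (l : List Int) (idx j : Nat) (v : Int) :
    (l.set idx v).getD j 0 = if idx = j ∧ idx < l.length then v else l.getD j 0 := by
  simp only [List.getD_eq_getElem?_getD, List.getElem?_set]
  by_cases h : idx = j
  · subst h
    by_cases hl : idx < l.length
    · simp [hl]
    · simp [hl]
  · simp [h]

-- countFwd when no later price is strictly smaller
lemma countFwd_all (p : Int) (l : List Int) (h : ∀ j, j < l.length → p ≤ l.getD j 0) :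
    countFwd p l = (l.length : Int) := by
  induction l with
  | nil => rfl
  | cons q rest ih =>
    have h0 : p ≤ q := by simpa using h 0 (by simp)
    have : countFwd p rest = (rest.length : Int) := by
      apply ih; intro j hj; simpa using h (j + 1) (by simpa using hj)
    simp [countFwd, not_lt.mpr h0, this]
    ring

-- countFwd when the first strictly smaller price is at position t
lemma countFwd_drop (p : Int) (l : List Int) (t : Nat) (ht : t < l.length)
    (hbefore : ∀ j, j < t → p ≤ l.getD j 0) (hdrop : l.getD t 0 < p) :
    countFwd p l = (t : Int) + 1 := by
  induction l generalizing t with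
  | nil => simp at ht
  | cons q rest ih =>
    cases t with
    | zero =>
      have : q < p := by simpa using hdrop
      simp [countFwd, this]
    | succ s =>
      have h0 : p ≤ q := by simpa using hbefore 0 (by omega)
      have : countFwd p rest = (s : Int) + 1 := by
        apply ih s (by simpa using ht)
        · intro j hj; simpa using hbefore (j + 1) (by omega)
        · simpa using hdrop
      simp [countFwd, not_lt.mpr h0, this]
      ring

-- the pop loop preserves the invariant and leaves only entries ≤ p
lemma popA_ok (prices : List Int) (p : Int) (i : Nat) :
    ∀ (stk : List (Int × Nat)) (ans : List Int),
    p = pv prices i → i < prices.length →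
    StkOk prices i stk → AnsOk prices i ans stk →
    StkOk prices i (popA p i ans stk).2 ∧ (∀ e ∈ (popA p i ans stk).2, e.1 ≤ p) ∧
      AnsOk prices i (popA p i ans stk).1 (popA p i ans stk).2 := by
  intro stk
  induction stk with
  | nil =>
    intro ans hp hi hs ha
    simpa [popA] using ⟨hs, ha⟩
  | cons e rest ih =>
    obtain ⟨q, idx⟩ := e
    intro ans hp hi hs ha
    obtain ⟨hpw, hmem⟩ := hs
    rw [List.pairwise_cons] at hpw
    obtain ⟨hhead, hpw'⟩ := hpw
    obtain ⟨hq0, hidx0, hkeep0⟩ := hmem (q, idx) (List.mem_cons_self)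
    have hq : q = pv prices idx := hq0
    have hidx : idx < i := hidx0
    have hkeep : keepU prices i idx := hkeep0
    obtain ⟨hlen, hmem0, hnonm, hfut⟩ := ha
    by_cases h : q > p
    · rw [show popA p i ans ((q, idx) :: rest) = popA p i (ans.set idx ((i : Int) - (idx : Int))) rest from by simp [popA, h]]
      apply ih
      · exact hp
      · exact hi
      · exact ⟨hpw', fun e he => hmem e (List.mem_cons_of_mem _ he)⟩
      · refine ⟨by simp [hlen], ?_, ?_, ?_⟩
        · intro j hj
          have hjidx : j ≠ idx := by
            obtain ⟨e, he, hej⟩ := List.mem_map.mp hj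
            have : e.2 < idx := (hhead e he).2
            omega
          rw [getD_set]
          simp only [if_neg (by tauto : ¬ (idx = j ∧ idx < ans.length))]
          exact hmem0 j (by simp only [List.map_cons]; exact List.mem_cons_of_mem _ hj)
        · intro i' hi' hni'
          by_cases hii : i' = idx
          · subst hii
            rw [getD_set, if_pos ⟨rfl, by omega⟩]
            have hcf : cf prices i' = (i' : Int) + ((i : Nat) - i' - 1 : Nat) + 1 - i' := by
              unfold cf
              rw [countFwd_drop (pv prices i') (prices.drop (i' + 1)) (i - i' - 1)]
              · omega
              · simp; omega
              · intro j hj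
                rw [getD_drop]
                exact hkeep (i' + 1 + j) (by omega) (by omega)
              · rw [getD_drop]
                have h1 : i' + 1 + (i - i' - 1) = i := by omega
                show pv prices (i' + 1 + (i - i' - 1)) < pv prices i'
                rw [h1, ← hp, ← hq]
                exact h
            constructor
            · rw [hcf]; omega
            · have : (i' : Int) < (i : Int) := by exact_mod_cast hidx
              omega
          · rw [getD_set]
            simp only [if_neg (by tauto : ¬ (idx = i' ∧ idx < ans.length))]
            exact hnonm i' hi' (by
              intro hc
              exact hni' (by
                simp only [List.map_cons] at hc ⊢
                rcases List.mem_cons.mp hc with h1 | h2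
                · exact absurd h1 (by simpa using hii)
                · exact h2))
        · intro i' hi'
          rw [getD_set]
          simp only [if_neg (by
            rintro ⟨rfl, -⟩
            omega : ¬ (idx = i' ∧ idx < ans.length))]
          exact hfut i' hi'
    · rw [show popA p i ans ((q, idx) :: rest) = (ans, (q, idx) :: rest) from by simp [popA, h]]
      refine ⟨⟨List.pairwise_cons.mpr ⟨hhead, hpw'⟩, hmem⟩, ?_, hlen, hmem0, hnonm, hfut⟩
      intro e he
      rcases List.mem_cons.mp he with rfl | h2
      · exact not_lt.mp h
      · exact le_trans (hhead e h2).1 (not_lt.mp h)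

-- pushing the current element advances the invariant from k = i to k = i+1
lemma push_ok (prices : List Int) (p : Int) (i : Nat) (ans : List Int) (stk : List (Int × Nat))
    (hp : p = pv prices i) (hi : i < prices.length)
    (hs : StkOk prices i stk) (hle : ∀ e ∈ stk, e.1 ≤ p) (ha : AnsOk prices i ans stk) :
    StkOk prices (i + 1) ((p, i) :: stk) ∧ AnsOk prices (i + 1) ans ((p, i) :: stk) := by
  obtain ⟨hpw, hmem⟩ := hs
  obtain ⟨hlen, hmem0, hnonm, hfut⟩ := ha
  refine ⟨⟨?_, ?_⟩, hlen, ?_, ?_, ?_⟩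
  · exact List.pairwise_cons.mpr ⟨fun e he => ⟨hle e he, (hmem e he).2.1⟩, hpw⟩
  · intro e he
    rcases List.mem_cons.mp he with rfl | h2
    · exact ⟨hp, by omega, fun j h1 h2 => by omega⟩
    · obtain ⟨h3, h4, h5⟩ := hmem e h2
      refine ⟨h3, by omega, fun j hj1 hj2 => ?_⟩
      by_cases hji : j = i
      · subst hji
        rw [← h3, ← hp]
        exact hle e h2
      · exact h5 j hj1 (by omega)
  · intro j hj
    simp only [List.map_cons] at hj
    rcases List.mem_cons.mp hj with rfl | h2
    · exact hfut j (le_refl _)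
    · exact hmem0 j h2
  · intro i' hi' hni'
    simp only [List.map_cons, List.mem_cons, not_or] at hni'
    exact hnonm i' (by omega) hni'.2
  · intro i' hi'
    exact hfut i' (by omega)

-- the whole fold establishes the invariant at k = prices.length
lemma fold_inv (prices : List Int) :
    ∀ (suf : List Int) (k : Nat) (ans : List Int) (stk : List (Int × Nat)),
    prices.drop k = suf → k ≤ prices.length →
    StkOk prices k stk → AnsOk prices k ans stk →
    StkOk prices prices.length ((suf.zipIdx k).foldl stepA (ans, stk)).2 ∧
      AnsOk prices prices.length ((suf.zipIdx k).foldl stepA (ans, stk)).1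
        ((suf.zipIdx k).foldl stepA (ans, stk)).2 := by
  intro suf
  induction suf with
  | nil =>
    intro k ans stk hdrop hk hs ha
    have : prices.length ≤ k := by
      have := congrArg List.length hdrop
      simp at this
      omega
    have hkn : k = prices.length := by omega
    subst hkn
    simpa using ⟨hs, ha⟩
  | cons p rest ih =>
    intro k ans stk hdrop hk hs ha
    have hkn : k < prices.length := by
      have := congrArg List.length hdrop
      simp at this
      omega
    have hp : p = pv prices k := by
      have h0 : (prices.drop k).getD 0 0 = prices.getD (k + 0) 0 := getD_drop prices k 0
      rw [hdrop] at h0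
      simpa [pv] using h0
    have hrest : prices.drop (k + 1) = rest := by
      have : (prices.drop k).drop 1 = prices.drop (k + 1) := by
        rw [List.drop_drop]
      rw [← this, hdrop]
      rfl
    rw [List.zipIdx_cons, List.foldl_cons]
    by_cases hk0 : k = 0
    · subst hk0
      have hstep : stepA (ans, stk) (p, 0) = (ans, (p, 0) :: stk) := by simp [stepA]
      rw [hstep]
      have hle : ∀ e ∈ stk, e.1 ≤ p := by
        intro e he
        exact absurd ((hs.2 e he).2.1) (by omega)
      obtain ⟨hs', ha'⟩ := push_ok prices p 0 ans stk hp hkn hs hle ha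
      exact ih 1 ans ((p, 0) :: stk) hrest (by omega) hs' ha'
    · have hstep : stepA (ans, stk) (p, k) =
          ((popA p k ans stk).1, (p, k) :: (popA p k ans stk).2) := by
        simp [stepA, hk0]
      rw [hstep]
      obtain ⟨hs1, hle1, ha1⟩ := popA_ok prices p k stk ans hp hkn hs ha
      obtain ⟨hs', ha'⟩ := push_ok prices p k (popA p k ans stk).1 (popA p k ans stk).2 hp hkn hs1 hle1 ha1
      exact ih (k + 1) _ _ hrest (by omega) hs' ha'

lemma alt_length (prices : List Int) : (solution_alt prices).length = prices.length := by
  induction prices with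
  | nil => rfl
  | cons p rest ih => simp [solution_alt, ih]

lemma alt_getD (prices : List Int) : ∀ i, i < prices.length →
    (solution_alt prices).getD i 0 = cf prices i := by
  induction prices with
  | nil => intro i hi; simp at hi
  | cons p rest ih =>
    intro i hi
    cases i with
    | zero => simp [solution_alt, cf, pv]
    | succ m =>
      simp only [solution_alt, List.getD_cons_succ]
      rw [ih m (by simpa using hi)]
      simp [cf, pv, List.drop_succ_cons]

-- ===== VERDICT (by name: the statement is the Claim_ definition above) =====
theorem solution_spec : Claim_equal_solution := by
  unfold Claim_equal_solution Spec_solution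
  intro prices _
  obtain ⟨hs, ha⟩ := fold_inv prices prices 0 (List.replicate prices.length 0) []
    (by rfl) (by omega) ⟨List.Pairwise.nil, by simp⟩
    ⟨by simp, by simp, by simp, fun i _ => by
      simp [List.getD_eq_getElem?_getD, List.getElem?_replicate]
      split <;> rfl⟩
  set r := (prices.zipIdx.foldl stepA (List.replicate prices.length 0, [])) with hr
  obtain ⟨hlen, hmem0, hnonm, -⟩ := ha
  unfold solution
  rw [← hr]
  apply List.ext_getElem
  · simp [hlen, alt_length]
  · intro i h1 h2
    have hin : i < prices.length := by simpa [hlen] using h1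
    have hrhs : (solution_alt prices)[i] = cf prices i := by
      rw [← List.getD_eq_getElem _ 0 h2]
      exact alt_getD prices i hin
    have hzi : (r.1.zipIdx)[i]'(by simpa using h1) = (r.1[i]'(by simpa using h1), i) := by
      rw [List.getElem_zipIdx]
      simp
    rw [List.getElem_map, hzi, hrhs]
    have hansi : r.1[i]'(by simpa using h1) = r.1.getD i 0 :=
      (List.getD_eq_getElem _ 0 (by simpa using h1)).symm
    by_cases hm : i ∈ r.2.map Prod.snd
    · have h0 : r.1.getD i 0 = 0 := hmem0 i hm
      rw [hansi, h0]
      obtain ⟨e, he, hei⟩ := List.mem_map.mp hm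
      obtain ⟨-, -, hkeep⟩ := hs.2 e he
      rw [hei] at hkeep
      have hcf : cf prices i = ((prices.drop (i + 1)).length : Int) := by
        unfold cf
        apply countFwd_all
        intro j hj
        rw [getD_drop]
        have hjlen : i + 1 + j < prices.length := by
          simp at hj
          omega
        exact hkeep (i + 1 + j) (by omega) hjlen
      rw [hcf]
      simp [hlen]
      omega
    · obtain ⟨hval, hge⟩ := hnonm i hin hm
      rw [hansi, hval]
      have : cf prices i ≠ 0 := by
        rw [← hval]
        omega
      simp only [if_neg this]
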